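-- pv_equiv track=rewrite | github.com/vyvy3n/cs336-hw1 | cs336_basics/BPE.py | _merge_word_with_index
-- ===== SOURCE A (Python) =====
-- def _merge_word_with_index(word: tuple, best_pair: tuple, new_token_id: int) -> tuple[tuple, set, set]:
--     byte_1, byte_2 = best_pair
--
--     new_word = []
--     old_pairs = []
--     new_pairs = []
--
--     i = 0
--     while i < len(word):
--         if i < len(word) - 1 and (word[i], word[i + 1]) == best_pair:
--             # Found the pair to merge!
--
--             # If there's a token before, the pair (prev, byte_1) becomes (prev, new_token_id)
--             if i > 0:
--                 old_pairs.append((word[i - 1], byte_1))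
--                 new_pairs.append((word[i - 1], new_token_id))
--
--             # If there's a token after, the pair (byte_2, next) becomes (new_token_id, next)
--             if i + 2 < len(word):
--                 old_pairs.append((byte_2, word[i + 2]))
--                 new_pairs.append((new_token_id, word[i + 2]))
--
--             # Add the merged token
--             new_word.append(new_token_id)
--             i += 2  # Skip both bytes of the merged pair
--         else:
--             new_word.append(word[i])
--             i += 1
--
--     return tuple(new_word), set(old_pairs), set(new_pairs)
-- ===== SOURCE B (Python) =====
-- def _merge_word_with_index(word: tuple, best_pair: tuple, new_token_id: int) -> tuple[tuple, set, set]: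
--     b1, b2 = best_pair
--     n = len(word)
--
--     # Pass 1: greedy scan collecting merge-start indices (a match consumes two tokens).
--     starts = []
--     i = 0
--     while i < n - 1:
--         if word[i] == b1 and word[i + 1] == b2:
--             starts.append(i)
--             i += 2
--         else:
--             i += 1
--
--     # Pass 2: stitch the new word from the untouched segments between merge points.
--     parts = []
--     prev_end = 0
--     for s in starts:
--         parts.extend(word[prev_end:s])
--         parts.append(new_token_id)
--         prev_end = s + 2
--     parts.extend(word[prev_end:])
--
--     # Pass 3: the changed neighbour pairs, read off the original word at each merge start.
--     old_pairs = set()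
--     new_pairs = set()
--     for s in starts:
--         if s > 0:
--             old_pairs.add((word[s - 1], b1))
--             new_pairs.add((word[s - 1], new_token_id))
--         if s + 2 < n:
--             old_pairs.add((b2, word[s + 2]))
--             new_pairs.add((new_token_id, word[s + 2]))
--
--     return tuple(parts), old_pairs, new_pairs
-- ===== Notes on version B (the rewrite author's own statement) =====
-- stated objective: alternative
-- what changed: A interleaves detection, emission and pair bookkeeping in one index loop; B first collects the greedy merge-start indices in a single scan, then stitches the new word from the untouched segments between merge points, and derives the changed neighbour pairs by a separate pass over the collected indices.
import Mathlib
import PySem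

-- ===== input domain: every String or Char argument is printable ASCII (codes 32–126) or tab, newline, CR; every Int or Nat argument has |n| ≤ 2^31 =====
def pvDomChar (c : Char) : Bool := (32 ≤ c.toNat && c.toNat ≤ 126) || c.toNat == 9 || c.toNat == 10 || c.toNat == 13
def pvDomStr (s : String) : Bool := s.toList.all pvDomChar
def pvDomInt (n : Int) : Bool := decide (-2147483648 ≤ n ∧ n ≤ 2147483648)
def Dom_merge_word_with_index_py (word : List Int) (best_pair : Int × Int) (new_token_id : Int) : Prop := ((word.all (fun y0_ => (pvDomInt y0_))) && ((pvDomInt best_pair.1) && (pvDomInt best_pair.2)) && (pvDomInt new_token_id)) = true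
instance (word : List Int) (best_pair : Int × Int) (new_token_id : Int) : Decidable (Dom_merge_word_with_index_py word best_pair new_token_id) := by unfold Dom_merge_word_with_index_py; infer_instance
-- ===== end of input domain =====

-- B restructures A's single interleaved index loop into three passes (collect merge starts,
-- stitch segments, derive pairs from the starts); same results, no speed claim.

-- ===== PORT A =====
-- A's while loop: index i, accumulators new_word / old_pairs / new_pairs.  The loop advances
-- i by ≥ 1 each iteration, so fuel := word.length makes the recursion structural without
-- changing any computed value; word[i] is always in range where read (guarded by the
-- loop/branch conditions), so List.getD is exact here.
def pvMergeLoopA (word : List Int) (b1 b2 nid : Int) :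
    Nat → Nat → List Int → List (Int × Int) → List (Int × Int) →
    List Int × List (Int × Int) × List (Int × Int)
  | 0, _, nw, op, np => (nw, op, np)
  | fuel + 1, i, nw, op, np =>
    if i < word.length then
      if i < word.length - 1 ∧ (word.getD i 0, word.getD (i + 1) 0) = (b1, b2) then
        let op1 := if 0 < i then op ++ [(word.getD (i - 1) 0, b1)] else op
        let np1 := if 0 < i then np ++ [(word.getD (i - 1) 0, nid)] else np
        let op2 := if i + 2 < word.length then op1 ++ [(b2, word.getD (i + 2) 0)] else op1
        let np2 := if i + 2 < word.length then np1 ++ [(nid, word.getD (i + 2) 0)] else np1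
        pvMergeLoopA word b1 b2 nid fuel (i + 2) (nw ++ [nid]) op2 np2
      else
        pvMergeLoopA word b1 b2 nid fuel (i + 1) (nw ++ [word.getD i 0]) op np
    else (nw, op, np)

def merge_word_with_index_py (word : List Int) (best_pair : Int × Int) (new_token_id : Int) :
    List Int × (List (Int × Int)) × (List (Int × Int)) :=
  let r := pvMergeLoopA word best_pair.1 best_pair.2 new_token_id word.length 0 [] [] []
  (r.1, PySem.Set.ofList r.2.1, PySem.Set.ofList r.2.2)

-- ===== PORT B =====
-- Pass 1: greedy scan collecting merge-start indices (a match consumes two tokens); i again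
-- advances by ≥ 1 per iteration, so fuel := word.length keeps the recursion structural.
def pvStartsB (word : List Int) (b1 b2 : Int) : Nat → Nat → List Nat
  | 0, _ => []
  | fuel + 1, i =>
    if i + 1 < word.length then
      if word.getD i 0 = b1 ∧ word.getD (i + 1) 0 = b2 then
        i :: pvStartsB word b1 b2 fuel (i + 2)
      else pvStartsB word b1 b2 fuel (i + 1)
    else []

-- Pass 2 (the for-loop over starts): state = (parts, prev_end); word[prev_end:s] is a
-- nonnegative in-order slice, exactly (word.drop prev_end).take (s - prev_end)
-- (PySem.List.slice_natCast).
def pvEmitB (word : List Int) (nid : Int) (ss : List Nat) : List Int × Nat :=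
  ss.foldl (fun st s => (st.1 ++ (word.drop st.2).take (s - st.2) ++ [nid], s + 2)) ([], 0)

-- Pass 3: set.add per collected start, reading the original word's neighbours.
def pvPairsB (word : List Int) (b1 b2 nid : Int) (ss : List Nat) :
    PySem.Set (Int × Int) × PySem.Set (Int × Int) :=
  ss.foldl (fun st s =>
    let op1 := if 0 < s then PySem.Set.add st.1 (word.getD (s - 1) 0, b1) else st.1
    let np1 := if 0 < s then PySem.Set.add st.2 (word.getD (s - 1) 0, nid) else st.2
    let op2 := if s + 2 < word.length then PySem.Set.add op1 (b2, word.getD (s + 2) 0) else op1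
    let np2 := if s + 2 < word.length then PySem.Set.add np1 (nid, word.getD (s + 2) 0) else np1
    (op2, np2)) (PySem.Set.empty, PySem.Set.empty)

def merge_word_with_index_py_alt (word : List Int) (best_pair : Int × Int) (new_token_id : Int) :
    List Int × (List (Int × Int)) × (List (Int × Int)) :=
  let ss := pvStartsB word best_pair.1 best_pair.2 word.length 0
  let em := pvEmitB word new_token_id ss
  let pr := pvPairsB word best_pair.1 best_pair.2 new_token_id ss
  (em.1 ++ word.drop em.2, pr.1, pr.2)

-- ===== PRECONDITION & SPEC =====
def Spec_merge_word_with_index_py (word : List Int) (best_pair : Int × Int) (new_token_id : Int) (out : List Int × (List (Int × Int)) × (List (Int × Int))) : Prop := out = merge_word_with_index_py_alt word best_pair new_token_id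
instance (word : List Int) (best_pair : Int × Int) (new_token_id : Int) (out : List Int × (List (Int × Int)) × (List (Int × Int))) : Decidable (Spec_merge_word_with_index_py word best_pair new_token_id out) := by unfold Spec_merge_word_with_index_py; infer_instance

-- ===== CLAIM (what is proved, stated in full; the proofs are below) =====
def Claim_equal_merge_word_with_index_py : Prop := ∀ (word : List Int) (best_pair : Int × Int) (new_token_id : Int), Dom_merge_word_with_index_py word best_pair new_token_id → Spec_merge_word_with_index_py word best_pair new_token_id (merge_word_with_index_py word best_pair new_token_id)

-- ===== LEMMAS AND PROOFS =====

-- Canonical recursive form of B's segment stitching (pass 2), used to bridge to A's loop.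
def pvSeg (word : List Int) (nid : Int) : Nat → List Nat → List Int
  | e, [] => word.drop e
  | e, s :: ss => (word.drop e).take (s - e) ++ nid :: pvSeg word nid (s + 2) ss

-- The per-start pair contributions (pass 3, as lists in emission order).
def pvOld (word : List Int) (b1 b2 : Int) (s : Nat) : List (Int × Int) :=
  (if 0 < s then [(word.getD (s - 1) 0, b1)] else []) ++
  (if s + 2 < word.length then [(b2, word.getD (s + 2) 0)] else [])

def pvNew (word : List Int) (nid : Int) (s : Nat) : List (Int × Int) :=
  (if 0 < s then [(word.getD (s - 1) 0, nid)] else []) ++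
  (if s + 2 < word.length then [(nid, word.getD (s + 2) 0)] else [])

lemma pvStartsB_bound (word : List Int) (b1 b2 : Int) :
    ∀ fuel i, ∀ s ∈ pvStartsB word b1 b2 fuel i, i ≤ s := by
  intro fuel
  induction fuel with
  | zero => intro i s hs; simp [pvStartsB] at hs
  | succ f ih =>
    intro i s hs
    simp only [pvStartsB] at hs
    split_ifs at hs with h1 h2
    · rcases List.mem_cons.mp hs with rfl | h
      · exact le_rfl
      · have := ih (i + 2) s h; omega
    · have := ih (i + 1) s hs; omega
    · simp at hs

lemma pvStartsB_nil (word : List Int) (b1 b2 : Int) (fuel j : Nat)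
    (h : ¬ j + 1 < word.length) : pvStartsB word b1 b2 fuel j = [] := by
  cases fuel <;> simp [pvStartsB, h]

lemma pvSeg_cons (word : List Int) (nid : Int) (i : Nat) (hi : i < word.length)
    (ss : List Nat) (hss : ∀ s ∈ ss, i + 1 ≤ s) :
    pvSeg word nid i ss = word.getD i 0 :: pvSeg word nid (i + 1) ss := by
  have hdrop : word.drop i = word.getD i 0 :: word.drop (i + 1) := by
    rw [List.getD_eq_getElem word 0 hi]
    exact List.drop_eq_getElem_cons hi
  cases ss with
  | nil => simp [pvSeg, hdrop]
  | cons s ss =>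
    have hs : i + 1 ≤ s := hss s (List.mem_cons_self ..)
    have : s - i = (s - (i + 1)) + 1 := by omega
    simp [pvSeg, hdrop, this]

-- A's loop equals: accumulators ++ (B's stitched suffix, per-start pair lists).
lemma mainA (word : List Int) (b1 b2 nid : Int) :
    ∀ fuel i nw op np, word.length - i ≤ fuel →
      pvMergeLoopA word b1 b2 nid fuel i nw op np =
        (nw ++ pvSeg word nid i (pvStartsB word b1 b2 fuel i),
         op ++ (pvStartsB word b1 b2 fuel i).flatMap (pvOld word b1 b2),
         np ++ (pvStartsB word b1 b2 fuel i).flatMap (pvNew word nid)) := by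
  intro fuel
  induction fuel with
  | zero =>
    intro i nw op np hk
    simp [pvMergeLoopA, pvStartsB, pvSeg,
      List.drop_eq_nil_of_le (by omega : word.length ≤ i)]
  | succ f ih =>
    intro i nw op np hk
    by_cases hi : i < word.length
    · by_cases hc : i < word.length - 1 ∧ (word.getD i 0, word.getD (i + 1) 0) = (b1, b2)
      · -- match at i
        have h1 : i + 1 < word.length := by omega
        have h2 : word.getD i 0 = b1 ∧ word.getD (i + 1) 0 = b2 := by
          have := hc.2; simpa [Prod.ext_iff] using this
        have hstarts : pvStartsB word b1 b2 (f + 1) i =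
            i :: pvStartsB word b1 b2 f (i + 2) := by
          rw [pvStartsB, if_pos h1, if_pos h2]
        rw [pvMergeLoopA, if_pos hi, if_pos hc, hstarts]
        simp only [pvSeg, pvOld, pvNew, List.flatMap_cons]
        split_ifs with hA hB hB <;>
          · rw [ih (i + 2) _ _ _ (by omega)]
            simp
      · -- no match at i
        rw [pvMergeLoopA, if_pos hi, if_neg hc]
        have hstarts : pvStartsB word b1 b2 (f + 1) i = pvStartsB word b1 b2 f (i + 1) := by
          by_cases h1 : i + 1 < word.length
          · rw [pvStartsB, if_pos h1,
              if_neg (fun h => hc ⟨by omega, by simpa [Prod.ext_iff] using h⟩)]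
          · rw [pvStartsB, if_neg h1, pvStartsB_nil word b1 b2 f (i + 1) (by omega)]
        rw [hstarts, ih (i + 1) _ _ _ (by omega)]
        have hb : ∀ s ∈ pvStartsB word b1 b2 f (i + 1), i + 1 ≤ s :=
          pvStartsB_bound word b1 b2 f (i + 1)
        rw [pvSeg_cons word nid i hi _ hb]
        simp
    · rw [pvMergeLoopA, if_neg hi, pvStartsB_nil word b1 b2 (f + 1) i (by omega)]
      simp [pvSeg, List.drop_eq_nil_of_le (by omega : word.length ≤ i)]

-- B's fold (pass 2) equals the canonical recursion.
lemma emitB_eq (word : List Int) (nid : Int) :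
    ∀ (ss : List Nat) (acc : List Int) (e : Nat),
      (let r := ss.foldl (fun st s => (st.1 ++ (word.drop st.2).take (s - st.2) ++ [nid], s + 2)) (acc, e)
       r.1 ++ word.drop r.2) = acc ++ pvSeg word nid e ss := by
  intro ss
  induction ss with
  | nil => intro acc e; simp [pvSeg]
  | cons s ss ih =>
    intro acc e
    simp only [List.foldl_cons]
    rw [ih]
    simp [pvSeg]

-- B's fold (pass 3) equals folding Set.add over the per-start pair lists.
lemma pairsB_eq (word : List Int) (b1 b2 nid : Int) :
    ∀ (ss : List Nat) (a b : PySem.Set (Int × Int)),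
      ss.foldl (fun st s =>
        let op1 := if 0 < s then PySem.Set.add st.1 (word.getD (s - 1) 0, b1) else st.1
        let np1 := if 0 < s then PySem.Set.add st.2 (word.getD (s - 1) 0, nid) else st.2
        let op2 := if s + 2 < word.length then PySem.Set.add op1 (b2, word.getD (s + 2) 0) else op1
        let np2 := if s + 2 < word.length then PySem.Set.add np1 (nid, word.getD (s + 2) 0) else np1
        (op2, np2)) (a, b) =
      ((ss.flatMap (pvOld word b1 b2)).foldl PySem.Set.add a,
       (ss.flatMap (pvNew word nid)).foldl PySem.Set.add b) := by
  intro ss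
  induction ss with
  | nil => intro a b; simp
  | cons s ss ih =>
    intro a b
    simp only [List.foldl_cons, List.flatMap_cons, List.foldl_append, pvOld, pvNew]
    split_ifs with hA hB hB <;>
      · rw [ih]
        simp

lemma ofList_eq_foldl_add {α : Type} [BEq α] (l : List α) :
    PySem.Set.ofList l = l.foldl PySem.Set.add PySem.Set.empty := rfl

-- ===== VERDICT (by name: the statement is the Claim_ definition above) =====
theorem merge_word_with_index_py_spec : Claim_equal_merge_word_with_index_py := by
  intro word bp nid _
  simp only [Spec_merge_word_with_index_py, merge_word_with_index_py,
    merge_word_with_index_py_alt, pvEmitB, pvPairsB]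
  rw [mainA word bp.1 bp.2 nid word.length 0 [] [] [] (by omega),
      pairsB_eq word bp.1 bp.2 nid (pvStartsB word bp.1 bp.2 word.length 0)
        PySem.Set.empty PySem.Set.empty]
  have he := emitB_eq word nid (pvStartsB word bp.1 bp.2 word.length 0) [] 0
  simp only [List.nil_append] at he ⊢
  refine Prod.ext ?_ (Prod.ext ?_ ?_)
  · simpa using he.symm
  · exact ofList_eq_foldl_add _
  · exact ofList_eq_foldl_add _
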